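-- pv_equiv track=rewrite | github.com/ryotaro612/lc | src/serial/construct_the_minimum_bitwise_array2.py | minBitwiseArray
-- ===== SOURCE A (Python) =====
-- from typing import List
--
-- def minBitwiseArray(nums: List[int]) -> List[int]:
--     """
--
--     """
--     result = []
--     for num in nums:
--         if num == 2:
--             result.append(-1)
--             continue
--
--         bit = bin(num)[2:]
--         if len(bit) == len([b for b in bit if b== '1']):
--             result.append(2**(len(bit)-1) - 1)
--             continue
--
--         i = 0
--         while num & (1<<i):
--             i += 1
--
--         result.append(num ^ (1<<(i-1)))
--
--     return result
-- ===== SOURCE B (Python) =====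
-- from typing import List
--
--
-- def _fix(num: int) -> int:
--     # num ^ (num+1) is the mask of the trailing-ones run plus the bit above it,
--     # so its bit_length minus 1 is the number of trailing one bits of num.
--     i = (num ^ (num + 1)).bit_length() - 1
--     return num ^ (1 << (i - 1))
--
--
-- def minBitwiseArray(nums: List[int]) -> List[int]:
--     return [-1 if num == 2 else _fix(num) for num in nums]
-- ===== Notes on version B (the rewrite author's own statement) =====
-- stated objective: simpler
-- what changed: B replaces A's binary-string construction, all-ones special branch and trailing-ones while-loop by one closed-form bit expression per element: i = (num ^ (num+1)).bit_length() - 1 counts the trailing ones directly, and num ^ (1 << (i-1)) already covers A's all-ones branch.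
import Mathlib
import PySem

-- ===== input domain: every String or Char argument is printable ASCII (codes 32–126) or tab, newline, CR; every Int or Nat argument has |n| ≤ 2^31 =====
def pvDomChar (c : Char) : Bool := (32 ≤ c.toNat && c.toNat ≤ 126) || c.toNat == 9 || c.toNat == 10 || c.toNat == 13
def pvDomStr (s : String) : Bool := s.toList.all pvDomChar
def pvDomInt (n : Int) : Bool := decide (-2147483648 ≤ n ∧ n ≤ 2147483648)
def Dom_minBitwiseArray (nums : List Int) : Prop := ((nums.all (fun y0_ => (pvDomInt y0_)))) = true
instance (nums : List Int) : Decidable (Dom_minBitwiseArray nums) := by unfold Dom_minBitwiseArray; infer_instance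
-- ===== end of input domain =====

-- B replaces A's binary-string build, all-ones branch and trailing-ones while-loop by one
-- closed-form bit expression per element (simpler); equivalence is about return values only.

-- ===== PORT A =====
-- bin(n) digits of a natural number, most significant first (bin(0)[2:] = "0"); exact hand port of bin
def natBits (n : Nat) : List Char :=
  if n < 2 then [if n = 1 then '1' else '0']
  else natBits (n / 2) ++ [if n % 2 = 1 then '1' else '0']
decreasing_by exact Nat.div_lt_self (by omega) (by omega)

-- bit = bin(num)[2:]  (for negatives bin gives '-0b…', so [2:] keeps a leading 'b'); exact
def binTail (num : Int) : List Char :=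
  if num < 0 then 'b' :: natBits num.natAbs else natBits num.toNat

-- the while-loop `i = 0; while num & (1 << i): i += 1` (the fuel only makes it total;
-- on Pre_ ∩ Dom the loop stops after at most 32 tests, so fuel 64 is never exhausted)
def trailLoop (num : Int) (i : Nat) : Nat → Nat
  | 0 => i
  | fuel + 1 => if PySem.Int.band num ((1 : Int) <<< i) ≠ 0 then trailLoop num (i + 1) fuel else i

-- one iteration of A's for-loop body (branches in A's order)
def stepA (num : Int) : Int :=
  if num = 2 then -1
  else
    let bit := binTail num
    if bit.length = (bit.filter (fun b => b = '1')).length then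
      2 ^ (bit.length - 1) - 1
    else
      let i := trailLoop num 0 64
      -- Python raises on 1 << (i-1) when i = 0 (even num ≠ 2); that is outside Pre_
      PySem.Int.bxor num ((1 : Int) <<< (i - 1))

def minBitwiseArray (nums : List Int) : List Int :=
  nums.foldl (fun result num => result ++ [stepA num]) []

-- ===== PORT B =====
def fixB (num : Int) : Int :=
  let i := PySem.Int.bitLength (PySem.Int.bxor num (num + 1)) - 1
  -- Python raises on 1 << (i-1) when i = 0 (even num, or -1); that is outside Pre_
  PySem.Int.bxor num ((1 : Int) <<< (i - 1))

def minBitwiseArray_alt (nums : List Int) : List Int :=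
  nums.map (fun num => if num = 2 then -1 else fixB num)

-- ===== PRECONDITION & SPEC =====
-- Pre_ excludes exactly the inputs on which A does not return: an element that is even and ≠ 2
-- makes A raise ValueError (1 << -1), and an element -1 makes A's while-loop run forever
-- (B raises ValueError on both kinds as well).
def Pre_minBitwiseArray (nums : List Int) : Prop :=
  ∀ num ∈ nums, (num % 2 = 1 ∧ num ≠ -1) ∨ num = 2

instance (nums : List Int) : Decidable (Pre_minBitwiseArray nums) := by
  unfold Pre_minBitwiseArray; infer_instance

def pvWitness_minBitwiseArray : List Int := [3, 2, -5, 21, 15, -2147483647]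

def Spec_minBitwiseArray (nums : List Int) (out : List Int) : Prop := out = minBitwiseArray_alt nums
instance (nums : List Int) (out : List Int) : Decidable (Spec_minBitwiseArray nums out) := by
  unfold Spec_minBitwiseArray; infer_instance

-- ===== CLAIM (what is proved, stated in full; the proofs are below) =====
def Claim_equal_minBitwiseArray : Prop := ∀ (nums : List Int), Dom_minBitwiseArray nums → Pre_minBitwiseArray nums → Spec_minBitwiseArray nums (minBitwiseArray nums)

-- ===== LEMMAS AND PROOFS =====

-- 1 << j as a cast Nat power
theorem one_shl (j : Nat) : (1 : Int) <<< j = ((2 ^ j : Nat) : Int) := by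
  rw [Int.shiftLeft_eq]; push_cast; ring

-- number of trailing one bits of a natural number
def tones (n : Nat) : Nat :=
  if n % 2 = 1 then tones (n / 2) + 1 else 0
decreasing_by exact Nat.div_lt_self (by omega) (by omega)

theorem tones_testBit_lt (n : Nat) : ∀ j, j < tones n → n.testBit j = true := by
  induction n using Nat.strong_induction_on with
  | _ n ih =>
    intro j hj
    rw [tones] at hj
    by_cases h : n % 2 = 1
    · simp only [h, if_true] at hj
      cases j with
      | zero => simp [Nat.testBit_zero, h]
      | succ j' =>
        rw [Nat.testBit_add_one]
        exact ih (n / 2) (Nat.div_lt_self (by omega) (by omega)) j' (by omega)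
    · simp [h] at hj

theorem tones_testBit_self (n : Nat) : n.testBit (tones n) = false := by
  induction n using Nat.strong_induction_on with
  | _ n ih =>
    rw [tones]
    by_cases h : n % 2 = 1
    · simp only [h, if_true]
      rw [Nat.testBit_add_one]
      exact ih (n / 2) (Nat.div_lt_self (by omega) (by omega))
    · simp [Nat.testBit_zero, h]

theorem tones_le (n : Nat) : 2 ^ tones n ≤ n + 1 := by
  induction n using Nat.strong_induction_on with
  | _ n ih =>
    rw [tones]
    by_cases h : n % 2 = 1
    · simp only [h, if_true, pow_succ]
      have := ih (n / 2) (Nat.div_lt_self (by omega) (by omega))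
      omega
    · rw [if_neg h]; omega

-- (2a+1) ^^^ (2b) = 2(a ^^^ b) + 1
theorem xor_odd_even (a b : Nat) : (2 * a + 1) ^^^ (2 * b) = 2 * (a ^^^ b) + 1 := by
  apply Nat.eq_of_testBit_eq
  intro i
  cases i with
  | zero => simp [Nat.testBit_zero, Nat.testBit_xor, Nat.mul_add_mod, Nat.mul_mod_right]
  | succ i' =>
    rw [Nat.testBit_xor, Nat.testBit_add_one, Nat.testBit_add_one, Nat.testBit_add_one]
    have h1 : (2 * a + 1) / 2 = a := by omega
    have h2 : 2 * b / 2 = b := by omega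
    have h3 : (2 * (a ^^^ b) + 1) / 2 = a ^^^ b := by omega
    rw [h1, h2, h3, ← Nat.testBit_xor]

theorem xor_even_succ (a : Nat) : (2 * a) ^^^ (2 * a + 1) = 1 := by
  rw [Nat.xor_comm, xor_odd_even, Nat.xor_self]

-- the central identity: for odd n, n ^^^ (n+1) is the all-ones mask of width (trailing ones + 1)
theorem xor_even_succ' (k : Nat) (h : k % 2 = 0) : k ^^^ (k + 1) = 1 := by
  obtain ⟨j, rfl⟩ : ∃ j, k = 2 * j := ⟨k / 2, by omega⟩
  exact xor_even_succ j

theorem xor_succ_eq (n : Nat) (hodd : n % 2 = 1) :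
    n ^^^ (n + 1) = 2 ^ (tones n + 1) - 1 := by
  induction n using Nat.strong_induction_on with
  | _ n ih =>
    obtain ⟨k, hn⟩ : ∃ k, n = 2 * k + 1 := ⟨n / 2, by omega⟩
    have hdiv : n / 2 = k := by omega
    have hmain : n ^^^ (n + 1) = 2 * (k ^^^ (k + 1)) + 1 := by
      have h1 : n + 1 = 2 * (k + 1) := by omega
      rw [h1]
      conv_lhs => rw [hn]
      exact xor_odd_even k (k + 1)
    rw [tones, if_pos hodd, hdiv, hmain]
    by_cases hk : k % 2 = 1
    · have ihk := ih k (by omega) hk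
      rw [ihk]
      have h2 : 1 ≤ 2 ^ (tones k + 1) := Nat.one_le_two_pow
      rw [pow_succ]
      omega
    · rw [xor_even_succ' k (by omega), tones, if_neg hk]
      norm_num

theorem testBit_succ_of_odd (x : Nat) (hodd : x % 2 = 1) (j : Nat) :
    (x + 1).testBit j = (x.testBit j).xor (decide (j < tones x + 1)) := by
  have h1 : x ^^^ (x ^^^ (x + 1)) = x + 1 := by
    rw [← Nat.xor_assoc, Nat.xor_self, Nat.zero_xor]
  conv_lhs => rw [← h1]
  rw [Nat.testBit_xor, xor_succ_eq x hodd, Nat.testBit_two_pow_sub_one]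

theorem tones_two_pow_sub_one (L : Nat) : tones (2 ^ L - 1) = L := by
  induction L with
  | zero => rw [tones]; simp
  | succ L' ih =>
    rw [tones]
    have h1 : (2 ^ (L' + 1) - 1) % 2 = 1 := by
      have : 2 ^ (L' + 1) = 2 * 2 ^ L' := by rw [pow_succ]; ring
      have : 1 ≤ 2 ^ L' := Nat.one_le_two_pow
      omega
    have h2 : (2 ^ (L' + 1) - 1) / 2 = 2 ^ L' - 1 := by
      have : 2 ^ (L' + 1) = 2 * 2 ^ L' := by rw [pow_succ]; ring
      have : 1 ≤ 2 ^ L' := Nat.one_le_two_pow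
      omega
    rw [if_pos h1, h2, ih]

theorem bitLength_mask (L : Nat) : PySem.Int.bitLength (((2 ^ (L + 1) - 1 : Nat) : Int)) = L + 1 := by
  induction L with
  | zero => decide
  | succ L' ih =>
    have hpos : 0 < 2 ^ (L' + 1 + 1) - 1 := by
      have : (2 : Nat) ^ 1 ≤ 2 ^ (L' + 1 + 1) := Nat.pow_le_pow_right (by omega) (by omega)
      simp at this
      omega
    rw [PySem.Int.bitLength_natCast hpos]
    have h2 : (2 ^ (L' + 1 + 1) - 1) / 2 = 2 ^ (L' + 1) - 1 := by
      have : 2 ^ (L' + 1 + 1) = 2 * 2 ^ (L' + 1) := by rw [pow_succ]; ring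
      have : 1 ≤ 2 ^ (L' + 1) := Nat.one_le_two_pow
      omega
    rw [h2, ih]

-- the loop: if bits i, …, i+k-1 are set and bit i+k is clear, the loop stops at i+k
theorem trailLoop_eq (k : Nat) : ∀ (num : Int) (i fuel : Nat), k < fuel →
    (∀ j, j < k → PySem.Int.band num ((1 : Int) <<< (i + j)) ≠ 0) →
    PySem.Int.band num ((1 : Int) <<< (i + k)) = 0 →
    trailLoop num i fuel = i + k := by
  induction k with
  | zero =>
    intro num i fuel hf _ hstop
    cases fuel with
    | zero => omega
    | succ f => rw [trailLoop]; simp only [Nat.add_zero] at hstop; simp [hstop]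
  | succ k' ih =>
    intro num i fuel hf hrun hstop
    cases fuel with
    | zero => omega
    | succ f =>
      rw [trailLoop]
      have h0 : PySem.Int.band num ((1 : Int) <<< i) ≠ 0 := by
        have := hrun 0 (by omega); simpa using this
      rw [if_pos h0]
      have := ih num (i + 1) f (by omega)
        (fun j hj => by have := hrun (j + 1) (by omega);
                        simpa [Nat.add_assoc, Nat.add_comm 1 j] using this)
        (by have : i + 1 + k' = i + (k' + 1) := by omega
            rw [this]; exact hstop)
      omega

-- band num (1 << j) for a nonnegative num
theorem band_pow_nonneg (n j : Nat) :
    PySem.Int.band ((n : Nat) : Int) ((1 : Int) <<< j) = 0 ↔ n.testBit j = false := by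
  rw [one_shl, PySem.Int.band_natCast, Nat.and_two_pow]
  cases h : n.testBit j <;> simp [h] <;> positivity

-- band num (1 << j) for a negative num = -M (bit j of num is the complement of bit j of M-1)
theorem band_pow_neg (M j : Nat) (hM : 1 ≤ M) :
    PySem.Int.band (-(M : Int)) ((1 : Int) <<< j) = 0 ↔ (M - 1).testBit j = true := by
  rw [one_shl, PySem.Int.band]
  have ha : ¬ (0 : Int) ≤ -(M : Int) := by
    simp only [not_le]
    have : (1 : Int) ≤ (M : Int) := by exact_mod_cast hM
    omega
  have hb : (0 : Int) ≤ ((2 ^ j : Nat) : Int) := by positivity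
  rw [if_neg ha, if_pos hb]
  have h1 : (((2 ^ j : Nat) : Int)).toNat = 2 ^ j := Int.toNat_natCast _
  have h2 : ((-(-(M : Int)) - 1)).toNat = M - 1 := by omega
  rw [h1, h2, Nat.two_pow_and]
  have hp : 0 < 2 ^ j := Nat.two_pow_pos j
  cases h : (M - 1).testBit j <;> simp [h] <;> omega

theorem bxor_neg_neg (M K : Nat) (hM : 1 ≤ M) (hK : 1 ≤ K) :
    PySem.Int.bxor (-(M : Int)) (-(K : Int)) = (((M - 1) ^^^ (K - 1) : Nat) : Int) := by
  rw [PySem.Int.bxor]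
  have ha : ¬ (0 : Int) ≤ -(M : Int) := by
    simp only [not_le]
    have : (1 : Int) ≤ (M : Int) := by exact_mod_cast hM
    omega
  have hb : ¬ (0 : Int) ≤ -(K : Int) := by
    simp only [not_le]
    have : (1 : Int) ≤ (K : Int) := by exact_mod_cast hK
    omega
  rw [if_neg ha, if_neg hb]
  have h2 : ((-(-(M : Int)) - 1)).toNat = M - 1 := by omega
  have h3 : ((-(-(K : Int)) - 1)).toNat = K - 1 := by omega
  rw [h2, h3]

-- the all-ones test of A, on the digits of a natural number
theorem natBits_len_pos (n : Nat) : 1 ≤ (natBits n).length := by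
  rw [natBits]
  split <;> simp

theorem natBits_all_ones (n : Nat) :
    ((natBits n).filter (fun b => b = '1')).length = (natBits n).length ↔
      n + 1 = 2 ^ (natBits n).length := by
  induction n using Nat.strong_induction_on with
  | _ n ih =>
    rw [natBits]
    by_cases h : n < 2
    · interval_cases n <;> simp
    · rw [if_neg h]
      have ihh := ih (n / 2) (Nat.div_lt_self (by omega) (by omega))
      rw [List.length_filter_eq_length_iff] at *
      constructor
      · intro hall
        have hlast : (if n % 2 = 1 then '1' else '0') = '1' := by
          apply of_decide_eq_true; apply hall; simp
        have hodd : n % 2 = 1 := by by_contra hc; simp [hc] at hlast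
        have hup : n / 2 + 1 = 2 ^ (natBits (n / 2)).length := by
          apply ihh.1
          intro a ha
          apply hall; simp [ha]
        simp only [List.length_append, List.length_cons, List.length_nil, Nat.zero_add]
        have : 2 ^ ((natBits (n / 2)).length + 1) = 2 * 2 ^ (natBits (n / 2)).length := by
          rw [pow_succ]; ring
        omega
      · intro hpow
        simp only [List.length_append, List.length_cons, List.length_nil, Nat.zero_add] at hpow
        have hexp : 2 ^ ((natBits (n / 2)).length + 1) = 2 * 2 ^ (natBits (n / 2)).length := by
          rw [pow_succ]; ring
        have hodd : n % 2 = 1 := by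
          rcases Nat.even_or_odd n with he | ho
          · exfalso
            have h1 : n % 2 = 0 := Nat.even_iff.1 he
            omega
          · exact Nat.odd_iff.1 ho
        have hup : n / 2 + 1 = 2 ^ (natBits (n / 2)).length := by omega
        intro a ha
        rcases List.mem_append.1 ha with h1 | h1
        · exact ihh.2 hup a h1
        · simp only [List.mem_cons, List.not_mem_nil, or_false] at h1
          subst h1; simp [hodd]

-- (2^L - 1) ^^^ 2^(L-1) = 2^(L-1) - 1   (clearing the top bit of an all-ones value)
theorem xor_top_bit (L : Nat) (hL : 1 ≤ L) :
    (2 ^ L - 1) ^^^ 2 ^ (L - 1) = 2 ^ (L - 1) - 1 := by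
  apply Nat.eq_of_testBit_eq
  intro i
  rw [Nat.testBit_xor, Nat.testBit_two_pow_sub_one, Nat.testBit_two_pow,
    Nat.testBit_two_pow_sub_one]
  by_cases h1 : i < L - 1
  · simp only [decide_eq_true_eq] at *
    rw [decide_eq_true (by omega : i < L), decide_eq_false (by omega : ¬ (L - 1) = i),
      decide_eq_true h1]
    rfl
  · by_cases h2 : i = L - 1
    · rw [decide_eq_true (by omega : i < L), decide_eq_true (by omega : L - 1 = i),
        decide_eq_false (by omega : ¬ i < L - 1)]
      rfl
    · rw [decide_eq_false (by omega : ¬ i < L), decide_eq_false (by omega : ¬ L - 1 = i),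
        decide_eq_false (by omega : ¬ i < L - 1)]
      rfl

theorem tones_bound (n c : Nat) (h : n + 1 ≤ 2 ^ c) : tones n ≤ c := by
  have h1 := tones_le n
  by_contra hc
  have : 2 ^ c < 2 ^ tones n := Nat.pow_lt_pow_right (by omega) (by omega)
  omega

-- the per-element equivalence, positive case
theorem step_pos (n : Nat) (hodd : n % 2 = 1) (hbound : n ≤ 2 ^ 31) :
    stepA ((n : Nat) : Int) = fixB ((n : Nat) : Int) := by
  have hne2 : ((n : Nat) : Int) ≠ 2 := by
    intro hc
    have : n = 2 := by exact_mod_cast hc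
    omega
  have hn1 : 1 ≤ n := by omega
  set t := tones n with ht
  -- B's index: bitLength (n ^^^ (n+1)) - 1 = t
  have hx : PySem.Int.bxor ((n : Nat) : Int) (((n : Nat) : Int) + 1)
      = ((2 ^ (t + 1) - 1 : Nat) : Int) := by
    have h1 : ((n : Nat) : Int) + 1 = (((n + 1 : Nat)) : Int) := by push_cast; ring
    rw [h1, PySem.Int.bxor_natCast, xor_succ_eq n hodd]
  have hBi : PySem.Int.bitLength (PySem.Int.bxor ((n : Nat) : Int) (((n : Nat) : Int) + 1)) - 1
      = t := by
    rw [hx, bitLength_mask]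
    omega
  -- bounds for the loop fuel
  have htb : t ≤ 31 := tones_bound n 31 (by norm_num at hbound ⊢; omega)
  -- A's loop stops at t
  have hloop : trailLoop ((n : Nat) : Int) 0 64 = t := by
    have := trailLoop_eq t ((n : Nat) : Int) 0 64 (by omega)
      (fun j hj => by
        rw [Nat.zero_add]
        intro hc
        rw [band_pow_nonneg] at hc
        rw [tones_testBit_lt n j hj] at hc
        simp at hc)
      (by rw [Nat.zero_add, band_pow_nonneg]; exact tones_testBit_self n)
    omega
  rw [stepA, fixB]
  rw [if_neg hne2]
  simp only [hBi, hloop]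
  have hbt : binTail ((n : Nat) : Int) = natBits n := by
    rw [binTail, if_neg (Int.not_lt.mpr (Int.natCast_nonneg n)), Int.toNat_natCast]
  rw [hbt]
  by_cases hall : (natBits n).length = ((natBits n).filter (fun b => b = '1')).length
  · -- all-ones branch of A
    rw [if_pos hall]
    have hpow : n + 1 = 2 ^ (natBits n).length := (natBits_all_ones n).1 hall.symm
    set L := (natBits n).length with hLdef
    have hL1 : 1 ≤ L := natBits_len_pos n
    have hnL : n = 2 ^ L - 1 := by omega
    have htL : t = L := by rw [ht, hnL, tones_two_pow_sub_one]
    rw [htL, one_shl]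
    have h2 : ((2 ^ (L - 1) : Nat) : Int) = (((2 ^ (L - 1) : Nat)) : Int) := rfl
    rw [hnL, PySem.Int.bxor_natCast, xor_top_bit L hL1]
    have hp : 1 ≤ 2 ^ (L - 1) := Nat.one_le_two_pow
    push_cast [hp]
    omega
  · rw [if_neg hall]

-- the per-element equivalence, negative case (num = -M, M odd, M ≥ 3)
theorem step_neg (M : Nat) (hodd : M % 2 = 1) (hM : 3 ≤ M) (hbound : M ≤ 2 ^ 31) :
    stepA (-(M : Int)) = fixB (-(M : Int)) := by
  have hMpos : (1 : Int) ≤ (M : Int) := by exact_mod_cast (by omega : 1 ≤ M)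
  have hne2 : -(M : Int) ≠ 2 := by omega
  have hneg : -(M : Int) < 0 := by omega
  -- x = M - 2 is odd; t = tones x is the number of trailing ones of -M
  set x := M - 2 with hxdef
  have hxodd : x % 2 = 1 := by omega
  set t := tones x with ht
  have hbit : ∀ j, (M - 1).testBit j = (x.testBit j).xor (decide (j < t + 1)) := by
    intro j
    have h1 : M - 1 = x + 1 := by omega
    rw [h1, testBit_succ_of_odd x hxodd]
  -- B's index
  have hx1 : -(M : Int) + 1 = -(((M - 1 : Nat)) : Int) := by push_cast [Nat.cast_sub (by omega : 1 ≤ M)]; ring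
  have hxor : PySem.Int.bxor (-(M : Int)) (-(M : Int) + 1) = ((2 ^ (t + 1) - 1 : Nat) : Int) := by
    rw [hx1, bxor_neg_neg M (M - 1) (by omega) (by omega)]
    have h2 : M - 1 - 1 = x := by omega
    have h3 : M - 1 = x + 1 := by omega
    rw [h2, Nat.xor_comm, h3, xor_succ_eq x hxodd]
  have hBi : PySem.Int.bitLength (PySem.Int.bxor (-(M : Int)) (-(M : Int) + 1)) - 1 = t := by
    rw [hxor, bitLength_mask]
    omega
  have htb : t ≤ 31 := tones_bound x 31 (by norm_num at hbound ⊢; omega)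
  -- A's loop stops at t
  have hloop : trailLoop (-(M : Int)) 0 64 = t := by
    have := trailLoop_eq t (-(M : Int)) 0 64 (by omega)
      (fun j hj => by
        rw [Nat.zero_add]
        intro hc
        rw [band_pow_neg M j (by omega)] at hc
        rw [hbit j, tones_testBit_lt x j hj, decide_eq_true (by omega : j < t + 1)] at hc
        simp at hc)
      (by
        rw [Nat.zero_add, band_pow_neg M t (by omega), hbit t, tones_testBit_self x,
          decide_eq_true (by omega : t < t + 1)]
        rfl)
    omega
  rw [stepA, fixB]
  rw [if_neg hne2]
  simp only [hBi, hloop]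
  -- the all-ones branch test is false: bit starts with 'b'
  have hbt : binTail (-(M : Int)) = 'b' :: natBits ((-(M : Int)).natAbs) := by
    rw [binTail, if_pos hneg]
  rw [hbt]
  have hfilter : (( 'b' :: natBits ((-(M : Int)).natAbs)).filter (fun b => b = '1')).length
      ≤ (natBits ((-(M : Int)).natAbs)).length := by
    have : ('b' :: natBits ((-(M : Int)).natAbs)).filter (fun b => b = '1')
        = (natBits ((-(M : Int)).natAbs)).filter (fun b => b = '1') := by
      rw [List.filter_cons]; simp
    rw [this]
    exact List.length_filter_le _ _
  rw [if_neg (by simp only [List.length_cons]; omega)]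

-- per-element equivalence on Pre_ ∩ Dom
theorem step_eq (num : Int) (hlo : -2147483648 ≤ num) (hhi : num ≤ 2147483648)
    (hpre : (num % 2 = 1 ∧ num ≠ -1) ∨ num = 2) :
    stepA num = (if num = 2 then -1 else fixB num) := by
  by_cases h2 : num = 2
  · subst h2; simp [stepA]
  · rw [if_neg h2]
    rcases hpre with ⟨hodd, hne1⟩ | h
    · by_cases hpos : 0 ≤ num
      · have hrep : num = ((num.toNat : Nat) : Int) := by omega
        rw [hrep]
        apply step_pos
        · omega
        · norm_num; omega
      · have hrep : num = -((num.natAbs : Nat) : Int) := by omega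
        rw [hrep]
        apply step_neg
        · omega
        · omega
        · norm_num; omega
    · exact absurd h h2

-- ===== VERDICT (by name: the statement is the Claim_ definition above) =====
theorem minBitwiseArray_spec : Claim_equal_minBitwiseArray := by
  intro nums hdom hpre
  unfold Spec_minBitwiseArray minBitwiseArray minBitwiseArray_alt
  rw [PySem.List.foldl_append_singleton_eq_map]
  apply List.map_congr_left
  intro num hmem
  have hd : pvDomInt num = true := by
    unfold Dom_minBitwiseArray at hdom
    rw [List.all_eq_true] at hdom
    exact hdom num hmem
  unfold pvDomInt at hd
  rw [decide_eq_true_eq] at hd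
  exact step_eq num hd.1 hd.2 (hpre num hmem)
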